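-- pv_equiv track=rewrite | github.com/yuhaitao025036-sys/Experience | experience/example/auto_encoder/prepare_dataset.py | _find_maskable_range
-- ===== SOURCE A (Python) =====
-- from typing import List, Tuple
--
-- def _find_maskable_range(content: str) -> Tuple[int, int]:
--     """Find the range of lines eligible for masking: skip import lines."""
--     lines = content.splitlines(keepends=True)
--     main_start = len(lines)
--     for i, line in enumerate(lines):
--         if line.strip().startswith("if __name__"):
--             main_start = i
--             break
--     code_start = 0
--     for i, line in enumerate(lines):
--         stripped = line.strip()
--         if stripped and not stripped.startswith("#") and not stripped.startswith("import ") and not stripped.startswith("from "):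
--             code_start = i
--             break
--     return code_start, main_start
-- ===== SOURCE B (Python) =====
-- def _find_maskable_range(content):
--     """Single pass: find first real code line and the `if __name__` line together."""
--     lines = content.splitlines(keepends=True)
--     main_start = len(lines)
--     code_start = 0
--     code_found = False
--     for i, line in enumerate(lines):
--         stripped = line.strip()
--         if not code_found and stripped and not stripped.startswith("#") and not stripped.startswith("import ") and not stripped.startswith("from "):
--             code_start = i
--             code_found = True
--         if stripped.startswith("if __name__"):
--             main_start = i
--             break
--     return code_start, main_start
-- ===== Notes on version B (the rewrite author's own statement) =====
-- stated objective: simpler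
-- what changed: Replaces A's two independent enumerate scans over the lines with a single pass that tracks code_start (with a found flag) and breaks at the `if __name__` line, relying on the fact that an `if __name__` line itself qualifies as code.
import Mathlib
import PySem

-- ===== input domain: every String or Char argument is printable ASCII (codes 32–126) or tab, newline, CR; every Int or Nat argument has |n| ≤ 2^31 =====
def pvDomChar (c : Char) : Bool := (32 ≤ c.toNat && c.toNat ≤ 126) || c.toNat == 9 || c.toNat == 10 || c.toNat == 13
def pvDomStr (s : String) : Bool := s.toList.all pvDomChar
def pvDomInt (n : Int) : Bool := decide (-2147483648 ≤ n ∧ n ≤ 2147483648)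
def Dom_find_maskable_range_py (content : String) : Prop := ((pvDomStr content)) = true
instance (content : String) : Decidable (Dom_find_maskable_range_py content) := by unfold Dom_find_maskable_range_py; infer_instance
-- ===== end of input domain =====

-- B merges A's two enumerate scans into one pass with a code_found flag; return value only, no side effects.

-- ===== PORT A =====
-- content.splitlines(keepends=True): ported by hand (PySem.Str.splitlines drops the line
-- terminators); exact for the terminators '\n', '\r', '\r\n' — the only ones inside Dom.
def pvSplitKeep : List Char → List (List Char)
  | [] => []
  | '\n' :: rest => ['\n'] :: pvSplitKeep rest
  | '\r' :: '\n' :: rest => ['\r', '\n'] :: pvSplitKeep rest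
  | '\r' :: rest => ['\r'] :: pvSplitKeep rest
  | c :: rest =>
      match pvSplitKeep rest with
      | [] => [[c]]
      | l :: ls => (c :: l) :: ls

-- A's first loop: first i whose stripped line starts with "if __name__", else the default (len lines)
def pvScanMain : List (List Char) → Int → Int → Int
  | [], _, dflt => dflt
  | line :: rest, i, dflt =>
      if PySem.Chars.startswith (PySem.Chars.strip line) "if __name__".toList
      then i else pvScanMain rest (i + 1) dflt

-- A's second loop: first i whose stripped line is nonempty and not a comment/import/from, else 0
def pvScanCode : List (List Char) → Int → Int
  | [], _ => 0
  | line :: rest, i =>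
      let stripped := PySem.Chars.strip line
      if !stripped.isEmpty && !PySem.Chars.startswith stripped "#".toList
          && !PySem.Chars.startswith stripped "import ".toList
          && !PySem.Chars.startswith stripped "from ".toList
      then i else pvScanCode rest (i + 1)

def find_maskable_range_py (content : String) : Int × Int :=
  let lines := pvSplitKeep content.toList
  let main_start := pvScanMain lines 0 (lines.length : Int)
  let code_start := pvScanCode lines 0
  (code_start, main_start)

-- ===== PORT B =====
-- B's single loop: state (i, code_found, code_start); at [] main_start = len(lines) = i
def pvScanBoth : List (List Char) → Int → Bool → Int → Int × Int
  | [], i, _, code_start => (code_start, i)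
  | line :: rest, i, found, code_start =>
      let stripped := PySem.Chars.strip line
      let hit := !found && !stripped.isEmpty
          && !PySem.Chars.startswith stripped "#".toList
          && !PySem.Chars.startswith stripped "import ".toList
          && !PySem.Chars.startswith stripped "from ".toList
      let code_start' := if hit then i else code_start
      let found' := found || hit
      if PySem.Chars.startswith stripped "if __name__".toList
      then (code_start', i)
      else pvScanBoth rest (i + 1) found' code_start'

def find_maskable_range_py_alt (content : String) : Int × Int :=
  pvScanBoth (pvSplitKeep content.toList) 0 false 0

-- ===== PRECONDITION & SPEC =====
def Spec_find_maskable_range_py (content : String) (out : Int × Int) : Prop := out = find_maskable_range_py_alt content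
instance (content : String) (out : Int × Int) : Decidable (Spec_find_maskable_range_py content out) := by unfold Spec_find_maskable_range_py; infer_instance

-- ===== CLAIM (what is proved, stated in full; the proofs are below) =====
def Claim_equal_find_maskable_range_py : Prop := ∀ (content : String), Dom_find_maskable_range_py content → Spec_find_maskable_range_py content (find_maskable_range_py content)

-- ===== LEMMAS AND PROOFS =====

-- a line whose strip starts with "if __name__" is itself a code line in A's sense
theorem pv_main_is_code (s : List Char)
    (h : PySem.Chars.startswith s "if __name__".toList = true) :
    (!s.isEmpty && !PySem.Chars.startswith s "#".toList
      && !PySem.Chars.startswith s "import ".toList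
      && !PySem.Chars.startswith s "from ".toList) = true := by
  rw [PySem.Chars.startswith_iff] at h
  obtain ⟨t, rfl⟩ := h
  simp [PySem.Chars.startswith, List.isPrefixOf]

theorem pvScanBoth_found (ls : List (List Char)) : ∀ (i cs : Int),
    pvScanBoth ls i true cs = (cs, pvScanMain ls i (i + (ls.length : Int))) := by
  induction ls with
  | nil => intro i cs; simp [pvScanBoth, pvScanMain]
  | cons l rest ih =>
      intro i cs
      simp only [pvScanBoth, pvScanMain, List.length_cons]
      have hfalse : (!true && !(PySem.Chars.strip l).isEmpty
          && !PySem.Chars.startswith (PySem.Chars.strip l) "#".toList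
          && !PySem.Chars.startswith (PySem.Chars.strip l) "import ".toList
          && !PySem.Chars.startswith (PySem.Chars.strip l) "from ".toList) = false := by simp
      rw [hfalse, if_neg (show ¬(false = true) by decide), Bool.or_false]
      by_cases h : PySem.Chars.startswith (PySem.Chars.strip l) "if __name__".toList = true
      · rw [if_pos h, if_pos h]
      · rw [if_neg h, if_neg h, ih (i + 1) cs]
        have harith : (i + 1) + (rest.length : Int) = i + ((rest.length + 1 : Nat) : Int) := by
          push_cast; ring
        rw [harith]

theorem pvScanBoth_eq (ls : List (List Char)) : ∀ (i : Int),
    pvScanBoth ls i false 0 = (pvScanCode ls i, pvScanMain ls i (i + (ls.length : Int))) := by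
  induction ls with
  | nil => intro i; simp [pvScanBoth, pvScanCode, pvScanMain]
  | cons l rest ih =>
      intro i
      simp only [pvScanBoth, pvScanCode, pvScanMain, List.length_cons, Bool.not_false,
        Bool.true_and, Bool.false_or]
      have harith : (i + 1) + (rest.length : Int) = i + ((rest.length + 1 : Nat) : Int) := by
        push_cast; ring
      by_cases hm : PySem.Chars.startswith (PySem.Chars.strip l) "if __name__".toList = true
      · have hcode := pv_main_is_code (PySem.Chars.strip l) hm
        rw [if_pos hm, if_pos hcode, if_pos hcode, if_pos hm]
      · by_cases hc : (!(PySem.Chars.strip l).isEmpty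
            && !PySem.Chars.startswith (PySem.Chars.strip l) "#".toList
            && !PySem.Chars.startswith (PySem.Chars.strip l) "import ".toList
            && !PySem.Chars.startswith (PySem.Chars.strip l) "from ".toList) = true
        · rw [if_neg hm, if_pos hc, hc, if_pos (show true = true from rfl),
            pvScanBoth_found rest (i + 1) i, if_neg hm, harith]
        · have hcf : (!(PySem.Chars.strip l).isEmpty
              && !PySem.Chars.startswith (PySem.Chars.strip l) "#".toList
              && !PySem.Chars.startswith (PySem.Chars.strip l) "import ".toList
              && !PySem.Chars.startswith (PySem.Chars.strip l) "from ".toList) = false := by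
            simpa using hc
          rw [if_neg hm, if_neg hc, hcf, if_neg (show ¬(false = true) by decide),
            ih (i + 1), if_neg hm, harith]

-- ===== VERDICT (by name: the statement is the Claim_ definition above) =====
theorem find_maskable_range_py_spec : Claim_equal_find_maskable_range_py := by
  intro content _
  unfold Spec_find_maskable_range_py find_maskable_range_py find_maskable_range_py_alt
  rw [pvScanBoth_eq (pvSplitKeep content.toList) 0]
  simp
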